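-- pv_equiv track=rewrite | github.com/shawinsoranakom/CodeSnippets | CollectedSnippets/ComplexMethod/cm004355.py | _reassemble_chunk_texts
-- ===== SOURCE A (Python) =====
-- def _reassemble_chunk_texts(
--         texts: list[str],
--         audio_chunk_index: list[tuple[int, int | None]],
--         separator: str = " ",
--     ) -> list[str]:
--         """Reassemble per-chunk transcription texts back into per-sample strings.
--
--         When audio inputs are longer than the feature extractor's `max_audio_clip_s`, they are split into
--         overlapping chunks before being fed to the model. This means a single original audio sample can
--         produce multiple decoded text segments. This method reverses that chunking: it groups the decoded
--         texts by their original sample index using `chunk_map`, orders the chunks, and joins them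
--         with `separator` to reconstruct one transcription string per input sample.
--
--         Args:
--             texts: Decoded text strings, one per model output (i.e. one per chunk).
--             audio_chunk_index: List of `(sample_idx, chunk_idx)` tuples that map each entry in
--                 `texts` back to its original sample and chunk position. A `chunk_idx` of `None`
--                 indicates the sample was not chunked.
--             separator: String used to join chunks belonging to the same sample. Defaults to a
--                 space; callers pass an empty string for languages that don't use spaces between
--                 words (e.g. Chinese, Japanese).
--
--         Returns:
--             A list of reassembled transcription strings, one per original input sample.
--         """
--         max_sample_idx = max(sample_idx for sample_idx, _ in audio_chunk_index)
--         outputs = [""] * (max_sample_idx + 1)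
--         chunked = {}
--
--         for (sample_idx, chunk_idx), text in zip(audio_chunk_index, texts):
--             if chunk_idx is None:
--                 outputs[sample_idx] = text
--             else:
--                 if sample_idx not in chunked:
--                     chunked[sample_idx] = []
--                 chunked[sample_idx].append((chunk_idx, text))
--
--         for sample_idx, chunk_items in chunked.items():
--             chunk_items.sort(key=lambda item: item[0])
--             non_empty = [t for _, t in chunk_items if t and t.strip()]
--             parts = [non_empty[0].rstrip()] + [t.strip() for t in non_empty[1:]]
--             outputs[sample_idx] = separator.join(parts)
--
--         return outputs
-- ===== SOURCE B (Python) =====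
-- def _reassemble_chunk_texts(
--         texts: list[str],
--         audio_chunk_index: list[tuple[int, int | None]],
--         separator: str = " ",
--     ) -> list[str]:
--     """Per-sample reconstruction: one direct scan of the (index, text) pairs per output slot."""
--     pairs = list(zip(audio_chunk_index, texts))
--     n = max(s for s, _ in audio_chunk_index) + 1
--     out = []
--     for i in range(n):
--         chunks = sorted(
--             ((c, t) for (s, c), t in pairs if s == i and c is not None),
--             key=lambda e: e[0],
--         )
--         if chunks:
--             kept = [t for _, t in chunks if t.strip()]
--             out.append(separator.join([kept[0].rstrip()] + [t.strip() for t in kept[1:]]))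
--         else:
--             nones = [t for (s, c), t in pairs if s == i and c is None]
--             out.append(nones[-1] if nones else "")
--     return out
-- ===== Notes on version B (the rewrite author's own statement) =====
-- stated objective: alternative
-- what changed: Instead of A's mutate-a-preallocated-list pass plus a dict of per-sample buckets that are sorted and written back, B makes one direct pass per output slot: for each sample index i it filters the zipped (index, text) pairs for i's chunk entries (sorted by chunk position) or, failing that, takes the last unchunked text, building the output list left to right by comprehension.
-- outside the precondition, e.g. on _reassemble_chunk_texts(['a', 'b'], [(1, None), (-1, None)], ' '): A returns ['', 'b'], B returns ['', 'a']
import Mathlib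
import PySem

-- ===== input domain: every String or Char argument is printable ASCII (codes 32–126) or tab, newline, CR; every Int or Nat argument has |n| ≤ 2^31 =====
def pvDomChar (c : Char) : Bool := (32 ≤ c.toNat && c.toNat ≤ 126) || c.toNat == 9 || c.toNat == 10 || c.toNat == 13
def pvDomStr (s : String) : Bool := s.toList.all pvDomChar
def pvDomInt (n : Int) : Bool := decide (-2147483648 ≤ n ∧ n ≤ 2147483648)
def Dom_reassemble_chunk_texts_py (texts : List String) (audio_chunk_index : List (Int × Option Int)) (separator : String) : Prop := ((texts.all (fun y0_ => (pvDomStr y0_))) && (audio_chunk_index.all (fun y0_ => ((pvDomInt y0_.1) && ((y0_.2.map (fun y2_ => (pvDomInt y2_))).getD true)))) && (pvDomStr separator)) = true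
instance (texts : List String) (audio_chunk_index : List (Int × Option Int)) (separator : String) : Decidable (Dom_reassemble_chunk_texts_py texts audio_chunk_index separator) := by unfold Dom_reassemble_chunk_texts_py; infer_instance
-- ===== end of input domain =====

-- B re-implements the reassembly as one direct filtered scan per output slot instead of A's
-- preallocated-list mutation plus a dict of per-sample buckets (objective: alternative).

-- ===== PORT A =====
-- first loop body: 'outputs[sample_idx] = text' / grow chunked[sample_idx]
def aStep (st : List String × PySem.Dict Int (List (Int × String))) (e : (Int × Option Int) × String) :
    List String × PySem.Dict Int (List (Int × String)) :=
  match e.1.2 with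
  | none => (PySem.List.pySetD st.1 e.1.1 e.2, st.2)   -- Python raises IndexError out of range (excluded by Pre_)
  | some c =>
      let d := if st.2.contains e.1.1 then st.2 else st.2.insert e.1.1 []
      (st.1, d.modify e.1.1 [] (fun xs => xs ++ [(c, e.2)]))

-- second loop body: sort a bucket, drop blank chunks, join, write back
def aStep2 (sep : String) (outputs : List String) (p : Int × List (Int × String)) : List String :=
  let chunk_items := PySem.List.sorted p.2 (fun it => it.1) false
  let non_empty := (chunk_items.filter (fun it => !(it.2 == "") && !(PySem.Str.strip it.2 == ""))).map (fun it => it.2)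
  match non_empty with
  | [] => outputs   -- Python raises IndexError here (excluded by Pre_)
  | h :: rest => PySem.List.pySetD outputs p.1 (PySem.Str.join sep (PySem.Str.rstrip h :: rest.map PySem.Str.strip))

def reassemble_chunk_texts_py (texts : List String) (audio_chunk_index : List (Int × Option Int)) (separator : String) : List String :=
  match PySem.List.max? (audio_chunk_index.map (fun p => p.1)) (fun x => x) with
  | none => []   -- max() raises ValueError on an empty index (excluded by Pre_)
  | some m =>
    let outputs := List.replicate (m + 1).toNat ""
    let st := (audio_chunk_index.zip texts).foldl aStep (outputs, PySem.Dict.empty)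
    st.2.items.foldl (aStep2 separator) st.1

-- ===== PORT B =====
-- the chunk entries of slot i, in pair order
def bChunks (pairs : List ((Int × Option Int) × String)) (i : Int) : List (Int × String) :=
  pairs.filterMap (fun e => match e.1.2 with
    | some c => if e.1.1 = i then some (c, e.2) else none
    | none => none)

-- the unchunked texts of slot i, in pair order
def bNones (pairs : List ((Int × Option Int) × String)) (i : Int) : List String :=
  pairs.filterMap (fun e => match e.1.2 with
    | none => if e.1.1 = i then some e.2 else none
    | some _ => none)

-- one output slot, computed directly
def bSlot (sep : String) (pairs : List ((Int × Option Int) × String)) (i : Int) : String :=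
  let chunks := PySem.List.sorted (bChunks pairs i) (fun p => p.1) false
  match chunks with
  | [] => (bNones pairs i).getLast?.getD ""
  | _ :: _ =>
    let kept := (chunks.filter (fun p => !(PySem.Str.strip p.2 == ""))).map (fun p => p.2)
    match kept with
    | [] => ""   -- Source B raises IndexError here (excluded by Pre_)
    | h :: rest => PySem.Str.join sep (PySem.Str.rstrip h :: rest.map PySem.Str.strip)

def reassemble_chunk_texts_py_alt (texts : List String) (audio_chunk_index : List (Int × Option Int)) (separator : String) : List String :=
  let pairs := audio_chunk_index.zip texts
  match PySem.List.max? (audio_chunk_index.map (fun p => p.1)) (fun x => x) with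
  | none => []   -- max() raises ValueError on an empty index in Source B too (excluded by Pre_)
  | some m => (PySem.List.pyRange 0 (m + 1) 1).map (bSlot separator pairs)

-- ===== PRECONDITION & SPEC =====
-- Pre_ excludes: the empty index list (A raises ValueError in max()); indices where some sample's
-- chunk texts all strip to empty (A raises IndexError on non_empty[0]); and NEGATIVE sample
-- indices among the entries actually paired with a text — there A still returns via Python's
-- list-wraparound assignment, but sample indices are positions of the original input samples, so
-- the natural domain is nonnegative and B does not reproduce the wraparound.
def Pre_reassemble_chunk_texts_py (texts : List String) (audio_chunk_index : List (Int × Option Int)) (separator : String) : Prop :=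
  audio_chunk_index ≠ [] ∧ (∀ e ∈ audio_chunk_index.zip texts, 0 ≤ e.1.1) ∧
  (∀ e ∈ audio_chunk_index.zip texts, e.1.2.isSome →
    ∃ e' ∈ audio_chunk_index.zip texts, e'.1.1 = e.1.1 ∧ e'.1.2.isSome ∧ PySem.Str.strip e'.2 ≠ "")
instance (texts : List String) (audio_chunk_index : List (Int × Option Int)) (separator : String) : Decidable (Pre_reassemble_chunk_texts_py texts audio_chunk_index separator) := by unfold Pre_reassemble_chunk_texts_py; infer_instance

def pvWitness_reassemble_chunk_texts_py : List String × (List (Int × Option Int)) × String :=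
  (["hello", "world ", " x"], [(0, some 1), (0, some 0), (1, none)], " ")

def Spec_reassemble_chunk_texts_py (texts : List String) (audio_chunk_index : List (Int × Option Int)) (separator : String) (out : List String) : Prop := out = reassemble_chunk_texts_py_alt texts audio_chunk_index separator
instance (texts : List String) (audio_chunk_index : List (Int × Option Int)) (separator : String) (out : List String) : Decidable (Spec_reassemble_chunk_texts_py texts audio_chunk_index separator out) := by unfold Spec_reassemble_chunk_texts_py; infer_instance

-- ===== CLAIM (what is proved, stated in full; the proofs are below) =====
def Claim_equal_reassemble_chunk_texts_py : Prop := ∀ (texts : List String) (audio_chunk_index : List (Int × Option Int)) (separator : String), Dom_reassemble_chunk_texts_py texts audio_chunk_index separator → Pre_reassemble_chunk_texts_py texts audio_chunk_index separator → Spec_reassemble_chunk_texts_py texts audio_chunk_index separator (reassemble_chunk_texts_py texts audio_chunk_index separator)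

-- ===== LEMMAS AND PROOFS =====

-- the string A writes for a slot whose bucket is nonempty (a function of the slot only)
def slotJoin (sep : String) (pairs : List ((Int × Option Int) × String)) (k : Int) : String :=
  match ((PySem.List.sorted (bChunks pairs k) (fun it => it.1) false).filter
          (fun it => !(it.2 == "") && !(PySem.Str.strip it.2 == ""))).map (fun it => it.2) with
  | [] => ""
  | h :: rest => PySem.Str.join sep (PySem.Str.rstrip h :: rest.map PySem.Str.strip)

theorem getLast?_cons_getD {α : Type} (a d : α) (xs : List α) :
    ((a :: xs).getLast?).getD d = (xs.getLast?).getD a := by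
  cases xs with
  | nil => simp
  | cons b t =>
    have h : (b :: t).getLast?.isSome := by simp [List.getLast?_isSome]
    obtain ⟨y, hy⟩ := Option.isSome_iff_exists.mp h
    simp [List.getLast?_cons_cons, hy]

-- A's truthiness test 't and t.strip()' equals B's 't.strip()'
theorem filter_cond_eq (t : String) :
    (!(t == "") && !(PySem.Str.strip t == "")) = !(PySem.Str.strip t == "") := by
  by_cases h : t = ""
  · subst h; decide
  · simp [h]

-- membership in bChunks
theorem mem_bChunks (pairs : List ((Int × Option Int) × String)) (i : Int) (p : Int × String) :
    p ∈ bChunks pairs i ↔ ∃ e ∈ pairs, e.1.1 = i ∧ e.1.2 = some p.1 ∧ e.2 = p.2 := by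
  simp only [bChunks, List.mem_filterMap]
  constructor
  · rintro ⟨e, he, hm⟩
    refine ⟨e, he, ?_⟩
    rcases hc : e.1.2 with _ | c <;> rw [hc] at hm
    · simp at hm
    · split_ifs at hm with hi
      injection hm with h; subst h
      exact ⟨hi, rfl, rfl⟩
  · rintro ⟨e, he, hi, hc, ht⟩
    exact ⟨e, he, by rw [hc]; simp [hi, ht]⟩

theorem bChunks_cons_none {e : (Int × Option Int) × String} (h : e.1.2 = none)
    (l : List ((Int × Option Int) × String)) (s : Int) :
    bChunks (e :: l) s = bChunks l s := by
  simp [bChunks, h]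

theorem bChunks_cons_some {e : (Int × Option Int) × String} {c : Int} (h : e.1.2 = some c)
    (l : List ((Int × Option Int) × String)) (s : Int) :
    bChunks (e :: l) s = (if e.1.1 = s then [(c, e.2)] else []) ++ bChunks l s := by
  simp only [bChunks, List.filterMap_cons, h]
  split_ifs <;> simp

theorem bNones_cons_none {e : (Int × Option Int) × String} (h : e.1.2 = none)
    (l : List ((Int × Option Int) × String)) (s : Int) :
    bNones (e :: l) s = (if e.1.1 = s then [e.2] else []) ++ bNones l s := by
  simp only [bNones, List.filterMap_cons, h]
  split_ifs <;> simp

theorem bNones_cons_some {e : (Int × Option Int) × String} {c : Int} (h : e.1.2 = some c)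
    (l : List ((Int × Option Int) × String)) (s : Int) :
    bNones (e :: l) s = bNones l s := by
  simp [bNones, h]

-- lookup/keys/nodup facts about one 'some' step of the first loop
theorem dictStep_getD (d : PySem.Dict Int (List (Int × String))) (s : Int) (v : Int × String) (x : Int) :
    (((if d.contains s then d else d.insert s []).modify s [] (fun xs => xs ++ [v])).getD x []) =
      if x = s then d.getD s [] ++ [v] else d.getD x [] := by
  have h0 : ∀ y, (if d.contains s then d else d.insert s []).getD y [] = d.getD y [] := by
    intro y
    by_cases hc : d.contains s
    · simp [hc]
    · simp only [Bool.not_eq_true] at hc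
      rw [if_neg (by simp [hc]), PySem.Dict.getD_insert]
      by_cases hy : y = s
      · rw [if_pos hy, hy, PySem.Dict.getD_of_not_contains _ _ hc]
      · rw [if_neg hy]
  rw [PySem.Dict.getD_modify, h0 s]
  by_cases hx : x = s
  · rw [if_pos hx, if_pos hx]
  · rw [if_neg hx, if_neg hx, h0]

theorem dictStep_mem_keys (d : PySem.Dict Int (List (Int × String))) (s : Int) (v : Int × String) (x : Int) :
    x ∈ (((if d.contains s then d else d.insert s []).modify s [] (fun xs => xs ++ [v])).keys) ↔
      x ∈ d.keys ∨ x = s := by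
  rw [PySem.Dict.keys_modify, PySem.Dict.mem_keys_insert]
  by_cases hc : d.contains s
  · simp [hc]; tauto
  · simp only [Bool.not_eq_true] at hc
    rw [if_neg (by simp [hc]), PySem.Dict.mem_keys_insert]
    tauto

theorem dictStep_nodup (d : PySem.Dict Int (List (Int × String))) (s : Int) (v : Int × String)
    (h : d.keys.Nodup) :
    (((if d.contains s then d else d.insert s []).modify s [] (fun xs => xs ++ [v])).keys).Nodup := by
  rw [PySem.Dict.keys_modify]
  apply PySem.Dict.nodup_keys_insert
  by_cases hc : d.contains s
  · simpa [hc]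
  · simp only [Bool.not_eq_true] at hc
    rw [if_neg (by simp [hc])]
    exact PySem.Dict.nodup_keys_insert _ _ _ h

-- the first-loop invariant
theorem loop1_inv (l : List ((Int × Option Int) × String)) :
    ∀ (os : List String) (d : PySem.Dict Int (List (Int × String))),
    (∀ e ∈ l, 0 ≤ e.1.1 ∧ e.1.1.toNat < os.length) →
    d.keys.Nodup →
    ((l.foldl aStep (os, d)).1.length = os.length) ∧
    (∀ s, (l.foldl aStep (os, d)).2.getD s [] = d.getD s [] ++ bChunks l s) ∧
    (∀ s, s ∈ (l.foldl aStep (os, d)).2.keys ↔ s ∈ d.keys ∨ bChunks l s ≠ []) ∧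
    ((l.foldl aStep (os, d)).2.keys.Nodup) ∧
    (∀ (j : Nat) (hj : j < os.length),
      (l.foldl aStep (os, d)).1[j]? = some (((bNones l (j : Int)).getLast?).getD (os[j]'hj))) := by
  induction l with
  | nil =>
    intro os d _ hnd
    refine ⟨rfl, ?_, ?_, hnd, ?_⟩
    · intro s; simp [bChunks]
    · intro s; simp [bChunks]
    · intro j hj; simp [bNones, List.getElem?_eq_getElem hj]
  | cons e l ih =>
    intro os d hb hnd
    obtain ⟨hb0, hbl⟩ : (0 ≤ e.1.1 ∧ e.1.1.toNat < os.length) ∧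
        (∀ e' ∈ l, 0 ≤ e'.1.1 ∧ e'.1.1.toNat < os.length) := by
      constructor
      · exact hb e (List.mem_cons_self ..)
      · intro e' he'; exact hb e' (List.mem_cons_of_mem _ he')
    rcases hc : e.1.2 with _ | c
    · -- chunk_idx is None: outputs[sample_idx] = text
      have hstep : aStep (os, d) e = (os.set e.1.1.toNat e.2, d) := by
        simp [aStep, hc, PySem.List.pySetD_of_nonneg _ _ hb0.1]
      rw [List.foldl_cons, hstep]
      have hbl' : ∀ e' ∈ l, 0 ≤ e'.1.1 ∧ e'.1.1.toNat < (os.set e.1.1.toNat e.2).length := by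
        simpa using hbl
      obtain ⟨ih1, ih2, ih3, ih4, ih5⟩ := ih (os.set e.1.1.toNat e.2) d hbl' hnd
      refine ⟨by simpa using ih1, ?_, ?_, ih4, ?_⟩
      · intro s; rw [ih2, bChunks_cons_none hc]
      · intro s; rw [ih3, bChunks_cons_none hc]
      · intro j hj
        have hj' : j < (os.set e.1.1.toNat e.2).length := by simpa using hj
        rw [ih5 j hj', bNones_cons_none hc]
        by_cases hjs : e.1.1 = (j : Int)
        · have hjn : e.1.1.toNat = j := by omega
          rw [if_pos hjs]
          simp only [List.singleton_append, getLast?_cons_getD]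
          congr 1
          rw [List.getElem_set, if_pos hjn]
        · have hjn : e.1.1.toNat ≠ j := by omega
          rw [if_neg hjs]
          simp only [List.nil_append]
          congr 2
          rw [List.getElem_set, if_neg hjn]
    · -- a chunk entry: grow the bucket
      have hstep : aStep (os, d) e =
          (os, (if d.contains e.1.1 then d else d.insert e.1.1 []).modify e.1.1 []
                (fun xs => xs ++ [(c, e.2)])) := by
        simp [aStep, hc]
      rw [List.foldl_cons, hstep]
      set d' := (if d.contains e.1.1 then d else d.insert e.1.1 []).modify e.1.1 []
                (fun xs => xs ++ [(c, e.2)]) with hd'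
      obtain ⟨ih1, ih2, ih3, ih4, ih5⟩ := ih os d' hbl (dictStep_nodup d e.1.1 (c, e.2) hnd)
      refine ⟨ih1, ?_, ?_, ih4, ?_⟩
      · intro s
        rw [ih2, hd', dictStep_getD, bChunks_cons_some hc]
        by_cases hs : s = e.1.1
        · rw [if_pos hs, if_pos hs.symm, hs, List.append_assoc]
        · rw [if_neg hs, if_neg (fun h => hs h.symm), List.nil_append]
      · intro s
        rw [ih3, hd', dictStep_mem_keys, bChunks_cons_some hc]
        by_cases hs : e.1.1 = s
        · simp [hs]
        · have hs' : ¬ (s = e.1.1) := fun h => hs h.symm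
          simp [hs, hs']
      · intro j hj
        rw [ih5 j hj, bNones_cons_some hc]

-- the second-loop shape: a fold of in-range writes at keys, value a function of the key only
theorem loop2_inv (G : Int → String) (ks : List Int) :
    ∀ (os : List String),
    (∀ k ∈ ks, 0 ≤ k ∧ k.toNat < os.length) →
    ((ks.foldl (fun os k => os.set k.toNat (G k)) os).length = os.length) ∧
    (∀ (j : Nat) (hj : j < os.length),
      (ks.foldl (fun os k => os.set k.toNat (G k)) os)[j]? =
        some (if (j : Int) ∈ ks then G j else os[j]'hj)) := by
  induction ks with
  | nil =>
    intro os _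
    exact ⟨rfl, fun j hj => by simp [List.getElem?_eq_getElem hj]⟩
  | cons k ks ih =>
    intro os hb
    obtain ⟨hk, hbl⟩ : (0 ≤ k ∧ k.toNat < os.length) ∧ (∀ k' ∈ ks, 0 ≤ k' ∧ k'.toNat < os.length) := by
      constructor
      · exact hb k (List.mem_cons_self ..)
      · intro k' hk'; exact hb k' (List.mem_cons_of_mem _ hk')
    have hbl' : ∀ k' ∈ ks, 0 ≤ k' ∧ k'.toNat < (os.set k.toNat (G k)).length := by simpa using hbl
    obtain ⟨ih1, ih2⟩ := ih (os.set k.toNat (G k)) hbl'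
    rw [List.foldl_cons]
    refine ⟨by simpa using ih1, ?_⟩
    intro j hj
    have hj' : j < (os.set k.toNat (G k)).length := by simpa using hj
    rw [ih2 j hj']
    by_cases hmem : (j : Int) ∈ ks
    · rw [if_pos hmem, if_pos (List.mem_cons_of_mem _ hmem)]
    · rw [if_neg hmem]
      by_cases hjk : (j : Int) = k
      · rw [if_pos (by simp [hjk])]
        have hkn : k.toNat = j := by omega
        congr 1
        rw [List.getElem_set, if_pos hkn, hjk]
      · rw [if_neg (by simp [hjk, hmem])]
        have hkn : k.toNat ≠ j := by omega
        congr 1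
        rw [List.getElem_set, if_neg hkn]

-- under Pre_'s survivor condition a nonempty bucket keeps at least one chunk text
theorem kept_ne_nil (pairs : List ((Int × Option Int) × String))
    (hsur : ∀ e ∈ pairs, e.1.2.isSome →
      ∃ e' ∈ pairs, e'.1.1 = e.1.1 ∧ e'.1.2.isSome ∧ PySem.Str.strip e'.2 ≠ "")
    (k : Int) (hk : bChunks pairs k ≠ []) :
    ((PySem.List.sorted (bChunks pairs k) (fun it => it.1) false).filter
        (fun it => !(it.2 == "") && !(PySem.Str.strip it.2 == ""))).map (fun it => it.2) ≠ [] := by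
  obtain ⟨p, hp⟩ := List.exists_mem_of_ne_nil _ hk
  obtain ⟨e, he, hek, hec, _⟩ := (mem_bChunks pairs k p).mp hp
  obtain ⟨e', he', hk', hs', hst'⟩ := hsur e he (by simp [hec])
  obtain ⟨c', hc'⟩ := Option.isSome_iff_exists.mp hs'
  have hmem : (c', e'.2) ∈ bChunks pairs k :=
    (mem_bChunks pairs k (c', e'.2)).mpr ⟨e', he', by rw [hk', hek], hc', rfl⟩
  have hmem2 : (c', e'.2) ∈ PySem.List.sorted (bChunks pairs k) (fun it => it.1) false :=
    (PySem.List.mem_sorted _ _ _ _).mpr hmem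
  have hcond : (!((c', e'.2).2 == "") && !(PySem.Str.strip (c', e'.2).2 == "")) = true := by
    rw [filter_cond_eq]; simpa using hst'
  exact List.ne_nil_of_mem (List.mem_map_of_mem (List.mem_filter.mpr ⟨hmem2, hcond⟩))

-- one iteration of A's second loop is an in-range write of slotJoin
theorem aStep2_eq_set (sep : String) (pairs : List ((Int × Option Int) × String)) (k : Int)
    (acc : List String) (h0 : 0 ≤ k)
    (hne : ((PySem.List.sorted (bChunks pairs k) (fun it => it.1) false).filter
        (fun it => !(it.2 == "") && !(PySem.Str.strip it.2 == ""))).map (fun it => it.2) ≠ []) :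
    aStep2 sep acc (k, bChunks pairs k) = acc.set k.toNat (slotJoin sep pairs k) := by
  rcases hl : ((PySem.List.sorted (bChunks pairs k) (fun it => it.1) false).filter
      (fun it => !(it.2 == "") && !(PySem.Str.strip it.2 == ""))).map (fun it => it.2) with _ | ⟨h, rest⟩
  · exact absurd hl hne
  · simp only [aStep2, slotJoin, hl]
    rw [PySem.List.pySetD_of_nonneg _ _ h0]

-- B's slot agrees with A's written string on a nonempty bucket …
theorem bSlot_eq_slotJoin (sep : String) (pairs : List ((Int × Option Int) × String)) (j : Int)
    (hk : bChunks pairs j ≠ []) :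
    bSlot sep pairs j = slotJoin sep pairs j := by
  have hfc : ∀ L : List (Int × String), L.filter (fun p => !(PySem.Str.strip p.2 == "")) =
      L.filter (fun it => !(it.2 == "") && !(PySem.Str.strip it.2 == "")) := by
    intro L
    apply List.filter_congr
    intro x _
    rw [filter_cond_eq]
  rcases hs : PySem.List.sorted (bChunks pairs j) (fun p => p.1) false with _ | ⟨p0, ps⟩
  · exact absurd ((PySem.List.sorted_eq_nil_iff _ _ _).mp hs) hk
  · simp only [bSlot, slotJoin, hs, hfc]

-- … and with the untouched slot value on an empty bucket
theorem bSlot_of_empty (sep : String) (pairs : List ((Int × Option Int) × String)) (j : Int)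
    (hk : bChunks pairs j = []) :
    bSlot sep pairs j = ((bNones pairs j).getLast?).getD "" := by
  simp [bSlot, hk, PySem.List.sorted]

-- ===== VERDICT (by name: the statement is the Claim_ definition above) =====
theorem reassemble_chunk_texts_py_spec : Claim_equal_reassemble_chunk_texts_py := by
  intro texts aci sep _ hPre
  obtain ⟨hne, hpos, hsur⟩ := hPre
  unfold Spec_reassemble_chunk_texts_py reassemble_chunk_texts_py reassemble_chunk_texts_py_alt
  rcases hmax : PySem.List.max? (aci.map (fun p => p.1)) (fun x => x) with _ | m
  · exact absurd (by simpa using (PySem.List.max?_eq_none_iff _ _).mp hmax) hne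
  · simp only [hmax]
    have hub : ∀ p ∈ aci, p.1 ≤ m := fun p hp =>
      PySem.List.max?_isMax hmax _ (List.mem_map_of_mem hp)
    have hbounds : ∀ e ∈ aci.zip texts, 0 ≤ e.1.1 ∧
        e.1.1.toNat < (List.replicate (m + 1).toNat "").length := by
      intro e he
      have h2 := hpos e he
      have h3 := hub e.1 (List.of_mem_zip (a := e.1) (b := e.2) (by simpa using he)).1
      simp only [List.length_replicate]
      omega
    obtain ⟨hlen1, hgetD, hkeys, hnd, hget1⟩ :=
      loop1_inv (aci.zip texts) (List.replicate (m + 1).toNat "") PySem.Dict.empty hbounds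
        PySem.Dict.nodup_keys_empty
    set st := (aci.zip texts).foldl aStep (List.replicate (m + 1).toNat "", PySem.Dict.empty)
      with hst
    have hgetD' : ∀ s, st.2.getD s [] = bChunks (aci.zip texts) s := by
      intro s; rw [hgetD s, PySem.Dict.getD_empty]; rfl
    have hkeys' : ∀ s, s ∈ st.2.keys ↔ bChunks (aci.zip texts) s ≠ [] := by
      intro s
      rw [hkeys s]
      simp [PySem.Dict.keys_empty]
    have hitems : st.2.items = st.2.keys.map (fun k => (k, st.2.getD k [])) :=
      PySem.Dict.items_eq_map_keys st.2 hnd []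
    rw [hitems, List.foldl_map]
    have hcong : ∀ (acc : List String), ∀ k ∈ st.2.keys,
        aStep2 sep acc (k, st.2.getD k []) = acc.set k.toNat (slotJoin sep (aci.zip texts) k) := by
      intro acc k hk
      have hckn : bChunks (aci.zip texts) k ≠ [] := (hkeys' k).mp hk
      obtain ⟨p, hp⟩ := List.exists_mem_of_ne_nil _ hckn
      obtain ⟨e, he, hek, _, _⟩ := (mem_bChunks _ k p).mp hp
      have h0 : 0 ≤ k := hek ▸ hpos e he
      rw [hgetD' k]
      exact aStep2_eq_set sep (aci.zip texts) k acc h0 (kept_ne_nil _ hsur k hckn)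
    rw [PySem.List.foldl_congr_mem st.2.keys _ _ st.1 hcong]
    have hbounds2 : ∀ k ∈ st.2.keys, 0 ≤ k ∧ k.toNat < st.1.length := by
      intro k hk
      have hckn : bChunks (aci.zip texts) k ≠ [] := (hkeys' k).mp hk
      obtain ⟨p, hp⟩ := List.exists_mem_of_ne_nil _ hckn
      obtain ⟨e, he, hek, _, _⟩ := (mem_bChunks _ k p).mp hp
      have h2 := hpos e he
      have h3 := hub e.1 (List.of_mem_zip (a := e.1) (b := e.2) (by simpa using he)).1
      rw [hlen1]
      simp only [List.length_replicate]
      omega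
    obtain ⟨hlen2, hget2⟩ := loop2_inv (slotJoin sep (aci.zip texts)) st.2.keys st.1 hbounds2
    apply List.ext_getElem?
    intro j
    by_cases hj : j < (m + 1).toNat
    · have hj1 : j < st.1.length := by rw [hlen1]; simpa using hj
      rw [hget2 j hj1]
      have hos1 : st.1[j]'hj1 = ((bNones (aci.zip texts) (j : Int)).getLast?).getD "" := by
        have := hget1 j (by simpa using hj)
        rw [List.getElem?_eq_getElem hj1] at this
        have h2 := Option.some.inj this
        rw [h2]
        congr 1
        simp
      rw [hos1]
      have hrhs : ((PySem.List.pyRange 0 (m + 1) 1).map (bSlot sep (aci.zip texts)))[j]? =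
          some (bSlot sep (aci.zip texts) (j : Int)) := by
        rw [PySem.List.pyRange_one]
        rw [List.map_map]
        rw [List.getElem?_map, List.getElem?_range (by simpa using hj)]
        simp
      rw [hrhs]
      congr 1
      by_cases hmem : (j : Int) ∈ st.2.keys
      · rw [if_pos hmem, bSlot_eq_slotJoin sep _ _ ((hkeys' _).mp hmem)]
      · rw [if_neg hmem, bSlot_of_empty sep _ _ (by
          by_contra hcne
          exact hmem ((hkeys' _).mpr hcne))]
    · rw [List.getElem?_eq_none, List.getElem?_eq_none]
      · rw [List.length_map, PySem.List.pyRange_one]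
        simp only [List.length_map, List.length_range]
        omega
      · rw [hlen2, hlen1]
        simpa using hj
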